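-- pv_equiv track=rewrite | github.com/YeeChuen/Viral-Escape-Research-old | pbd_filterRNA.py | removeRNA
-- ===== SOURCE A (Python) =====
-- def checkRNA(seq):
--     RNA = ["A","U","G","C"]
--     for letter in seq:
--         if letter not in RNA:
--             return False
--     return True
--
-- def removeRNA(f_list):
--     a = []
--     for i in range(0,len(f_list),2):
--         if f_list[i] == "":
--             continue
--         if checkRNA(f_list[i+1]) == False:
--             a.append(f_list[i])
--             a.append(f_list[i+1])
--     return a
-- ===== SOURCE B (Python) =====
-- def removeRNA(f_list):
--     out = f_list[:len(f_list) - len(f_list) % 2]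
--     i = len(out) - 2
--     while i >= 0:
--         if out[i] == "" or set(out[i + 1]) <= {"A", "U", "G", "C"}:
--             del out[i:i + 2]
--         i -= 2
--     return out
-- ===== Notes on version B (the rewrite author's own statement) =====
-- stated objective: alternative
-- what changed: B constructs the result by the complement: it copies the even-length prefix and, scanning backwards with a while loop, deletes in place (del out[i:i+2]) each pair whose name is empty or whose sequence passes the set test set(seq) <= {'A','U','G','C'}, instead of A's forward range loop that appends kept pairs after an early-return character scan.
import Mathlib
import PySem

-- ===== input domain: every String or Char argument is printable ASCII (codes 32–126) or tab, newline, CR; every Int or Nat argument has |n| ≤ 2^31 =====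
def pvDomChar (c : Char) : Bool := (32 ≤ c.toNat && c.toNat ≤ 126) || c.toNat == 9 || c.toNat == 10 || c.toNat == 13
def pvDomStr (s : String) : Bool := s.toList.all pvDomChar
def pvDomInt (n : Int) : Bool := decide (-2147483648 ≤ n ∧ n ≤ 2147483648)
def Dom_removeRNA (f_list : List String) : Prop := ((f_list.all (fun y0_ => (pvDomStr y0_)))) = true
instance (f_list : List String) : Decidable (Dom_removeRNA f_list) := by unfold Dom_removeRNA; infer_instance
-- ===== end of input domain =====

-- B builds the answer by the complement: it copies the even-length prefix and deletes each
-- dropped pair in place, scanning backwards, with the all-RNA test as a set comparison —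
-- instead of A's forward index loop appending kept pairs with an early-return character scan
-- (objective: alternative; same cost).

-- ===== PORT A =====
-- checkRNA: scan letters, early return False on the first letter outside RNA
def checkRNAGo : List Char → Bool
  | [] => true
  | letter :: rest =>
      if (['A', 'U', 'G', 'C'].contains letter) = false then false
      else checkRNAGo rest

def checkRNA (seq : String) : Bool := checkRNAGo seq.toList

-- loop 'for i in range(0, len(f_list), 2)'; f_list[i] is always in range there, and
-- f_list[i+1] is reached only on inputs admitted by Pre_removeRNA, so pyGetD's default is never used
def removeRNA (f_list : List String) : List String :=
  (PySem.List.pyRange 0 (f_list.length : Int) 2).foldl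
    (fun a i =>
      if PySem.List.pyGetD f_list i "" = "" then a
      else if checkRNA (PySem.List.pyGetD f_list (i + 1) "") = false then
        (a ++ [PySem.List.pyGetD f_list i ""]) ++ [PySem.List.pyGetD f_list (i + 1) ""]
      else a)
    []

-- ===== PORT B =====
def rnaSet : PySem.Set Char := PySem.Set.ofList ['A', 'U', 'G', 'C']

-- one iteration of the while loop at index i: test out[i] / set(out[i+1]) <= RNA,
-- and 'del out[i:i+2]' is out[:i] ++ out[i+2:]
def delStep (out : List String) (i : Int) : List String :=
  if (PySem.List.pyGetD out i "" = "") ||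
     PySem.Set.issubset (PySem.Set.ofList (PySem.List.pyGetD out (i + 1) "").toList) rnaSet
  then PySem.List.slice out none (some i) ++ PySem.List.slice out (some (i + 2)) none
  else out

-- 'i = len(out) - 2; while i >= 0: …; i -= 2' — with k+1 iterations left, i = 2*k;
-- the loop runs len(out)/2 times since out has even length
def delGo : Nat → List String → List String
  | 0, out => out
  | k + 1, out => delGo k (delStep out (2 * (k : Int)))

def removeRNA_alt (f_list : List String) : List String :=
  let out := PySem.List.slice f_list none (some ((f_list.length - f_list.length % 2 : Nat) : Int))
  delGo (out.length / 2) out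

-- ===== PRECONDITION & SPEC =====
-- Pre_ excludes exactly the inputs on which A raises IndexError: an odd-length list whose
-- last element is non-empty (the loop reads f_list[i+1] past the end).
def Pre_removeRNA (f_list : List String) : Prop :=
  f_list.length % 2 = 0 ∨ f_list.getLast? = some ""
instance (f_list : List String) : Decidable (Pre_removeRNA f_list) := by
  unfold Pre_removeRNA; infer_instance

def pvWitness_removeRNA : List String := ["gene1", "AUXG", "gene2", "AUGC"]

def Spec_removeRNA (f_list : List String) (out : List String) : Prop := out = removeRNA_alt f_list
instance (f_list : List String) (out : List String) : Decidable (Spec_removeRNA f_list out) := by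
  unfold Spec_removeRNA; infer_instance

-- ===== CLAIM (what is proved, stated in full; the proofs are below) =====
def Claim_equal_removeRNA : Prop := ∀ (f_list : List String), Dom_removeRNA f_list →
  Pre_removeRNA f_list → Spec_removeRNA f_list (removeRNA f_list)

-- ===== LEMMAS AND PROOFS =====

-- the body of A's loop at index i, as the list it appends
def aStep (xs : List String) (i : Int) : List String :=
  if PySem.List.pyGetD xs i "" = "" then []
  else if checkRNA (PySem.List.pyGetD xs (i + 1) "") = false then
    [PySem.List.pyGetD xs i "", PySem.List.pyGetD xs (i + 1) ""]
  else []

theorem removeRNA_eq_flatMap (xs : List String) :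
    removeRNA xs = (PySem.List.pyRange 0 (xs.length : Int) 2).flatMap (aStep xs) := by
  unfold removeRNA
  have h : (fun (a : List String) (i : Int) =>
      if PySem.List.pyGetD xs i "" = "" then a
      else if checkRNA (PySem.List.pyGetD xs (i + 1) "") = false then
        (a ++ [PySem.List.pyGetD xs i ""]) ++ [PySem.List.pyGetD xs (i + 1) ""]
      else a) = (fun a i => a ++ aStep xs i) := by
    funext a i
    simp only [aStep]
    split_ifs <;> simp
  rw [h, PySem.List.foldl_append_eq_flatMap]
  simp

theorem pyRange2_shift (n : Nat) :
    PySem.List.pyRange 0 ((n : Int) + 2) 2 = 0 :: (PySem.List.pyRange 0 (n : Int) 2).map (· + 2) := by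
  rw [PySem.List.pyRange_of_pos 0 ((n : Int) + 2) (by norm_num),
      PySem.List.pyRange_of_pos 0 (n : Int) (by norm_num)]
  have h1 : (0 : Int) < (n : Int) + 2 := by omega
  rw [if_pos h1]
  have hc : (((n : Int) + 2 - 0 + 2 - 1) / 2).toNat
      = (if (0 : Int) < (n : Int) then (((n : Int) - 0 + 2 - 1) / 2).toNat else 0) + 1 := by
    split_ifs <;> omega
  rw [hc, List.range_succ_eq_map]
  simp only [List.map_cons, List.map_map]
  refine List.cons_eq_cons.mpr ⟨by norm_num, List.map_congr_left ?_⟩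
  intro a _
  simp only [Function.comp_apply]
  push_cast
  ring

theorem aStep_shift (x y : String) (r : List String) (i : Int) (h0 : 0 ≤ i) :
    aStep (x :: y :: r) (i + 2) = aStep r i := by
  have g1 : PySem.List.pyGetD (x :: y :: r) (i + 2) "" = PySem.List.pyGetD r i "" := by
    rw [PySem.List.pyGetD_of_nonneg _ _ (by omega), PySem.List.pyGetD_of_nonneg _ _ h0]
    have : (i + 2).toNat = i.toNat + 2 := by omega
    rw [this]
    rfl
  have g2 : PySem.List.pyGetD (x :: y :: r) (i + 2 + 1) "" = PySem.List.pyGetD r (i + 1) "" := by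
    rw [PySem.List.pyGetD_of_nonneg _ _ (by omega), PySem.List.pyGetD_of_nonneg _ _ (by omega)]
    have : (i + 2 + 1).toNat = (i + 1).toNat + 2 := by omega
    rw [this]
    rfl
  simp only [aStep, g1, g2]

theorem removeRNA_cons2 (x y : String) (r : List String) :
    removeRNA (x :: y :: r) = aStep (x :: y :: r) 0 ++ removeRNA r := by
  rw [removeRNA_eq_flatMap, removeRNA_eq_flatMap]
  have hl : ((x :: y :: r).length : Int) = (r.length : Int) + 2 := by
    simp; omega
  rw [hl, pyRange2_shift, List.flatMap_cons]
  congr 1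
  rw [List.flatMap_def, List.flatMap_def, List.map_map]
  congr 1
  apply List.map_congr_left
  intro i hi
  have h0 : 0 ≤ i := ((PySem.List.mem_pyRange_iff_of_pos (by norm_num) i).1 hi).1
  simp only [Function.comp_apply]
  exact aStep_shift x y r i h0

theorem checkRNAGo_eq_all (l : List Char) :
    checkRNAGo l = l.all (fun c => ['A', 'U', 'G', 'C'].contains c) := by
  induction l with
  | nil => rfl
  | cons c r ih =>
    simp only [checkRNAGo, List.all_cons, ih]
    cases h : (['A', 'U', 'G', 'C'].contains c) <;> simp

theorem checkRNA_eq_issubset (y : String) :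
    checkRNA y = PySem.Set.issubset (PySem.Set.ofList y.toList) rnaSet := by
  rw [Bool.eq_iff_iff]
  simp [checkRNA, checkRNAGo_eq_all, rnaSet, PySem.Set.issubset, PySem.Set.contains,
    PySem.Set.mem_ofList]

-- B-side: one deletion step, shifted past a leading pair
theorem delStep_shift (x y : String) (r : List String) (i : Int) (h0 : 0 ≤ i) :
    delStep (x :: y :: r) (i + 2) = x :: y :: delStep r i := by
  have g1 : PySem.List.pyGetD (x :: y :: r) (i + 2) "" = PySem.List.pyGetD r i "" := by
    rw [PySem.List.pyGetD_of_nonneg _ _ (by omega), PySem.List.pyGetD_of_nonneg _ _ h0]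
    have : (i + 2).toNat = i.toNat + 2 := by omega
    rw [this]
    rfl
  have g2 : PySem.List.pyGetD (x :: y :: r) (i + 2 + 1) "" = PySem.List.pyGetD r (i + 1) "" := by
    rw [PySem.List.pyGetD_of_nonneg _ _ (by omega), PySem.List.pyGetD_of_nonneg _ _ (by omega)]
    have : (i + 2 + 1).toNat = (i + 1).toNat + 2 := by omega
    rw [this]
    rfl
  have g3 : PySem.List.slice (x :: y :: r) none (some (i + 2))
      = x :: y :: PySem.List.slice r none (some i) := by
    rw [PySem.List.slice_to, PySem.List.slice_to] <;> try omega
    have : (i + 2).toNat = i.toNat + 2 := by omega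
    rw [this]
    rfl
  have g4 : PySem.List.slice (x :: y :: r) (some (i + 2 + 2)) none
      = PySem.List.slice r (some (i + 2)) none := by
    rw [PySem.List.slice_from, PySem.List.slice_from] <;> try omega
    have : (i + 2 + 2).toNat = (i + 2).toNat + 2 := by omega
    rw [this]
    rfl
  simp only [delStep, g1, g2, g3, g4]
  split_ifs <;> simp

theorem delStep_zero (x y : String) (t : List String) :
    delStep (x :: y :: t) 0
    = if (x = "") || PySem.Set.issubset (PySem.Set.ofList y.toList) rnaSet
      then t else x :: y :: t := by
  have g1 : PySem.List.pyGetD (x :: y :: t) 0 "" = x := PySem.List.pyGetD_zero_cons x _ ""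
  have g2 : PySem.List.pyGetD (x :: y :: t) (0 + 1) "" = y := by
    rw [PySem.List.pyGetD_of_nonneg _ _ (by omega)]
    rfl
  have g3 : PySem.List.slice (x :: y :: t) none (some 0) = [] := by
    rw [PySem.List.slice_to] <;> try omega
    rfl
  have g4 : PySem.List.slice (x :: y :: t) (some (0 + 2)) none = t := by
    rw [PySem.List.slice_from] <;> try omega
    rfl
  simp only [delStep, g1, g2, g3, g4, List.nil_append]

-- the backward sweep over k+1 pairs: the k upper iterations act on the tail, the last on the head
theorem delGo_cons2 (k : Nat) (x y : String) (r : List String) :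
    delGo (k + 1) (x :: y :: r) = delStep (x :: y :: delGo k r) 0 := by
  induction k generalizing r with
  | zero => rfl
  | succ k ih =>
    show delGo (k + 1) (delStep (x :: y :: r) (2 * ((k : Int) + 1))) = _
    have h2 : 2 * ((k : Int) + 1) = 2 * (k : Int) + 2 := by ring
    rw [h2, delStep_shift x y r _ (by positivity), ih]
    rfl

theorem take_even_cons2 (x y : String) (r : List String) :
    (x :: y :: r).take ((x :: y :: r).length - (x :: y :: r).length % 2)
    = x :: y :: r.take (r.length - r.length % 2) := by
  have h : (x :: y :: r).length - (x :: y :: r).length % 2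
      = (r.length - r.length % 2) + 2 := by
    simp only [List.length_cons]
    omega
  rw [h]
  rfl

theorem alt_eq_delGo_take (f : List String) :
    removeRNA_alt f = delGo ((f.length - f.length % 2) / 2) (f.take (f.length - f.length % 2)) := by
  unfold removeRNA_alt
  rw [PySem.List.slice_to_natCast]
  show delGo ((List.take (f.length - f.length % 2) f).length / 2)
      (List.take (f.length - f.length % 2) f) = _
  rw [List.length_take_of_le (by omega : f.length - f.length % 2 ≤ f.length)]

theorem removeRNA_alt_cons2 (x y : String) (r : List String) :
    removeRNA_alt (x :: y :: r)
    = (if (x = "") || PySem.Set.issubset (PySem.Set.ofList y.toList) rnaSet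
       then [] else [x, y]) ++ removeRNA_alt r := by
  rw [alt_eq_delGo_take, alt_eq_delGo_take, take_even_cons2]
  have hk : ((x :: y :: r).length - (x :: y :: r).length % 2) / 2
      = (r.length - r.length % 2) / 2 + 1 := by
    simp only [List.length_cons]
    omega
  rw [hk, delGo_cons2, delStep_zero]
  split_ifs <;> simp

theorem head_eq (x y : String) :
    (if x = "" then [] else if checkRNA y = false then [x, y] else ([] : List String))
    = (if (x = "") || PySem.Set.issubset (PySem.Set.ofList y.toList) rnaSet
       then [] else [x, y]) := by
  rw [← checkRNA_eq_issubset]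
  cases h : checkRNA y <;> by_cases hx : x = "" <;> simp_all

theorem pre_tail (x y : String) (r : List String) (h : Pre_removeRNA (x :: y :: r)) :
    Pre_removeRNA r := by
  rcases r with _ | ⟨a, t⟩
  · left; rfl
  · rcases h with h | h
    · left; simp only [List.length_cons] at h ⊢; omega
    · right; simpa [List.getLast?_cons_cons] using h

theorem main_eq : ∀ (n : Nat) (xs : List String), xs.length = n → Pre_removeRNA xs →
    removeRNA xs = removeRNA_alt xs := by
  intro n
  induction n using Nat.strong_induction_on with
  | _ n ih =>
    intro xs hlen hpre
    match xs with
    | [] => rfl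
    | [x] =>
      have hx : x = "" := by
        rcases hpre with h | h
        · simp at h
        · simpa using h
      subst hx
      rfl
    | x :: y :: r =>
      rw [removeRNA_cons2, removeRNA_alt_cons2]
      have ha : aStep (x :: y :: r) 0
          = (if x = "" then [] else if checkRNA y = false then [x, y] else ([] : List String)) := by
        simp [aStep, PySem.List.pyGetD_ofNat']
      rw [ha, head_eq]
      congr 1
      exact ih r.length (by simp at hlen; omega) r rfl (pre_tail x y r hpre)

-- ===== VERDICT (by name: the statement is the Claim_ definition above) =====
theorem removeRNA_spec : Claim_equal_removeRNA := by
  intro xs _ hpre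
  unfold Spec_removeRNA
  exact main_eq xs.length xs rfl hpre
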